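-- pv_equiv track=rewrite | github.com/BluePhoenix01/Programming-Creek | 26_triangle.py | minTriangleSumDP
-- ===== SOURCE A (Python) =====
-- def minTriangleSumDP(triangle):
--     if not triangle:
--         return 0
--
--     dp = triangle[-1].copy()
--     for row in range(len(triangle) - 2, -1, -1):
--         for i in range(row+1):
--             dp[i] = triangle[row][i] + min(dp[i], dp[i+1])
--
--     return dp[0]
-- ===== SOURCE B (Python) =====
-- def minTriangleSumDP(triangle):
--     if not triangle:
--         return 0
--     dp = [triangle[0][0]]
--     for r in range(1, len(triangle)):
--         row = triangle[r]
--         dp = ([row[0] + dp[0]]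
--               + [v + min(a, b) for v, a, b in zip(row[1:], dp, dp[1:])]
--               + [row[r] + dp[-1]])
--     return min(dp)
-- ===== Notes on version B (the rewrite author's own statement) =====
-- stated objective: alternative
-- what changed: Replaces the bottom-up in-place sweep (mutating a copy of the last row upward and returning dp[0]) by a top-down DP that builds a fresh prefix-minimum row per triangle row and returns min of the final row; the input is never mutated.
import Mathlib
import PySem

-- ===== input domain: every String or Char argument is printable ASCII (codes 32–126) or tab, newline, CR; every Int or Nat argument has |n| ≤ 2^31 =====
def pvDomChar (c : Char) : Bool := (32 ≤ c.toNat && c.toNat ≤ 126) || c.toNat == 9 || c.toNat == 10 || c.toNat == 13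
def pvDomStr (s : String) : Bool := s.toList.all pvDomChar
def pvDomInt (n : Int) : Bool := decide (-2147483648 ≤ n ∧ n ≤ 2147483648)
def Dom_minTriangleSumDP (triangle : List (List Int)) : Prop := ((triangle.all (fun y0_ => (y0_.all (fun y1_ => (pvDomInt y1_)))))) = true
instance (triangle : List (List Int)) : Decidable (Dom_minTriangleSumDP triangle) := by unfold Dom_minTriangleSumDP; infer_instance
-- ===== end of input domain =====

-- B replaces A's bottom-up in-place sweep by a top-down DP building fresh rows and taking min at the end (alternative decomposition, same cost; input not mutated).


-- ===== PORT A =====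
-- literal port of A: dp = copy of last row; for row = len-2 .. 0: for i = 0 .. row: dp[i] = t[row][i] + min(dp[i], dp[i+1]); return dp[0]
def minTriangleSumDP (triangle : List (List Int)) : Int :=
  if triangle = [] then 0
  else
    PySem.List.pyGetD
      ((PySem.List.pyRange (PySem.List.len triangle - 2) (-1) (-1)).foldl
        (fun dp row =>
          (PySem.List.pyRange 0 (row + 1) 1).foldl
            (fun s i =>
              PySem.List.pySetD s i
                (PySem.List.pyGetD (PySem.List.pyGetD triangle row []) i 0
                  + min (PySem.List.pyGetD s i 0) (PySem.List.pyGetD s (i + 1) 0)))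
            dp)
        (PySem.List.pyGetD triangle (-1) []))
      0 0

-- ===== PORT B =====
-- one top-down step of B: [row[0] + dp[0]] + [v + min(a, b) for v, a, b in zip(row[1:], dp, dp[1:])] + [row[r] + dp[-1]]
def pvBStep (dp row : List Int) (r : Int) : List Int :=
  [PySem.List.pyGetD row 0 0 + PySem.List.pyGetD dp 0 0]
    ++ ((PySem.List.slice row (some 1) none).zip (dp.zip (PySem.List.slice dp (some 1) none))).map
        (fun p => p.1 + min p.2.1 p.2.2)
    ++ [PySem.List.pyGetD row r 0 + PySem.List.pyGetD dp (-1) 0]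

def minTriangleSumDP_alt (triangle : List (List Int)) : Int :=
  if triangle = [] then 0
  else
    match PySem.List.min?
        ((PySem.List.pyRange 1 (PySem.List.len triangle) 1).foldl
          (fun dp r => pvBStep dp (PySem.List.pyGetD triangle r []) r)
          [PySem.List.pyGetD (PySem.List.pyGetD triangle 0 []) 0 0])
        (fun x => x) with
    | some m => m
    | none => 0

-- ===== PRECONDITION & SPEC =====
-- Pre_: row r has at least r+1 entries — exactly the triangles on which A returns (on any other input A raises IndexError)
def Pre_minTriangleSumDP (triangle : List (List Int)) : Prop :=
  ∀ r (_ : r < triangle.length), r + 1 ≤ (triangle[r]).length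
instance (triangle : List (List Int)) : Decidable (Pre_minTriangleSumDP triangle) := by
  unfold Pre_minTriangleSumDP; infer_instance
def pvWitness_minTriangleSumDP : List (List Int) := [[1], [2, 3]]

def Spec_minTriangleSumDP (triangle : List (List Int)) (out : Int) : Prop := out = minTriangleSumDP_alt triangle
instance (triangle : List (List Int)) (out : Int) : Decidable (Spec_minTriangleSumDP triangle out) := by unfold Spec_minTriangleSumDP; infer_instance

-- ===== CLAIM (what is proved, stated in full; the proofs are below) =====
def Claim_equal_minTriangleSumDP : Prop := ∀ (triangle : List (List Int)), Dom_minTriangleSumDP triangle → Pre_minTriangleSumDP triangle → Spec_minTriangleSumDP triangle (minTriangleSumDP triangle)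

-- ===== LEMMAS AND PROOFS =====



def pvMinL (l : List Int) : Int := l.foldl min (l.getD 0 0)

lemma pvMinL_append_singleton (l : List Int) (hl : l ≠ []) (x : Int) :
    pvMinL (l ++ [x]) = min (pvMinL l) x := by
  cases l with
  | nil => simp at hl
  | cons a t => simp [pvMinL, List.foldl_append]

lemma pvMinL_cons (a : Int) (t : List Int) : pvMinL (a :: t) = t.foldl min a := by
  simp [pvMinL, List.foldl_cons]

def pvG (d F : Nat → Int) (k i : Nat) : Int :=
  (if i = 0 then d 0 else if i = k then d (k-1) else min (d (i-1)) (d i)) + F i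

lemma pvKey (d F : Nat → Int) : ∀ k, 1 ≤ k →
    pvMinL ((List.range (k+1)).map (pvG d F k)) =
    pvMinL ((List.range k).map (fun i => d i + min (F i) (F (i+1)))) := by
  intro k hk
  induction k with
  | zero => omega
  | succ k ih =>
    rcases Nat.eq_or_lt_of_le hk with h1 | h1
    · -- k + 1 = 1
      have hk0 : k = 0 := by omega
      subst hk0
      simp [List.range_succ, pvG, pvMinL]
    · have hk1 : 1 ≤ k := by omega
      have hne : (List.range k).map (pvG d F k) ≠ [] := by
        simp [List.map_eq_nil_iff, List.range_eq_nil]; omega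
      have hne2 : (List.range (k+1)).map (pvG d F (k+1)) ≠ [] := by
        simp [List.map_eq_nil_iff, List.range_eq_nil]
      have hcongr : (List.range k).map (pvG d F (k+1)) = (List.range k).map (pvG d F k) := by
        apply List.map_congr_left
        intro i hi
        simp only [List.mem_range] at hi
        unfold pvG
        by_cases h0 : i = 0
        · simp [h0]
        · have : i ≠ k := by omega
          have : i ≠ k + 1 := by omega
          simp [*]
      have e1 : (List.range (k+2)).map (pvG d F (k+1))
          = ((List.range k).map (pvG d F k) ++ [pvG d F (k+1) k]) ++ [pvG d F (k+1) (k+1)] := by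
        rw [List.range_succ, List.map_append, List.range_succ, List.map_append, hcongr]
        simp
      rw [e1, pvMinL_append_singleton _ (by simp) _, pvMinL_append_singleton _ hne _]
      have e2 : (List.range (k+1)).map (fun i => d i + min (F i) (F (i+1)))
          = (List.range k).map (fun i => d i + min (F i) (F (i+1))) ++ [d k + min (F k) (F (k+1))] := by
        rw [List.range_succ, List.map_append]; simp
      rw [e2, pvMinL_append_singleton _ (by simp [List.range_eq_nil]; omega) _, ← ih hk1]
      have e3 : (List.range (k+1)).map (pvG d F k) = (List.range k).map (pvG d F k) ++ [pvG d F k k] := by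
        rw [List.range_succ, List.map_append]; simp
      rw [e3, pvMinL_append_singleton _ hne _]
      have g1 : pvG d F (k+1) k = min (d (k-1)) (d k) + F k := by
        unfold pvG; have h0 : k ≠ 0 := by omega
        simp [h0]
      have g2 : pvG d F (k+1) (k+1) = d k + F (k+1) := by
        unfold pvG; simp
      have g3 : pvG d F k k = d (k-1) + F k := by
        unfold pvG
        have h0 : k ≠ 0 := by omega
        rw [if_neg h0, if_pos rfl]
      rw [g1, g2, g3]
      omega
def pvH (dp row : List Int) (k i : Nat) : Int :=
  (if i = 0 then dp.getD 0 0 else if i = k then dp.getD (k-1) 0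
   else min (dp.getD (i-1) 0) (dp.getD i 0)) + row.getD i 0

lemma pvBStep_eq (dp row : List Int) (k : Nat) (hk : 1 ≤ k) (hdp : dp.length = k)
    (hrow : k + 1 ≤ row.length) :
    pvBStep dp row (k : Int) = (List.range (k+1)).map (pvH dp row k) := by
  have hdpne : dp ≠ [] := by intro h; rw [h] at hdp; simp at hdp; omega
  rw [pvBStep, PySem.List.slice_from_one, PySem.List.slice_from_one,
    PySem.List.pyGetD_neg_one dp 0 hdpne, PySem.List.pyGetD_zero,
    PySem.List.pyGetD_zero, PySem.List.pyGetD_natCast]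
  set M := (row.tail.zip (dp.zip dp.tail)).map (fun p => p.1 + min p.2.1 p.2.2) with hM
  have hzlen : M.length = k - 1 := by
    simp [hM, List.length_zip, List.length_tail, hdp]
    omega
  have hlen1 : ((row.getD 0 0 + dp.getD 0 0) :: M).length = k := by
    simp [hzlen]; omega
  apply List.ext_getElem
  · simp only [List.singleton_append, List.length_append, List.length_cons, hzlen,
      List.length_map, List.length_range, List.length_nil]
    omega
  · intro i h1 h2
    simp only [List.length_map, List.length_range] at h2
    simp only [List.singleton_append, List.getElem_map, List.getElem_range]
    rw [List.getElem_append]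
    rcases Nat.eq_zero_or_pos i with hi0 | hipos
    · subst hi0
      rw [dif_pos (by omega)]
      simp only [List.getElem_cons_zero, pvH]
      simp
      omega
    · obtain ⟨j, rfl⟩ : ∃ j, i = j + 1 := ⟨i - 1, by omega⟩
      rcases Nat.lt_or_ge j (k - 1) with hj | hj
      · -- interior
        rw [dif_pos (by rw [hlen1]; omega)]
        simp only [List.getElem_cons_succ]
        have hjM : j < M.length := by omega
        simp only [hM, List.getElem_map, List.getElem_zip, List.getElem_tail]
        have hne0 : j + 1 ≠ 0 := by omega
        have hnek : j + 1 ≠ k := by omega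
        simp only [pvH, if_neg hne0, if_neg hnek]
        rw [List.getD_eq_getElem _ _ (by omega : j + 1 - 1 < dp.length),
          List.getD_eq_getElem _ _ (by omega : j + 1 < dp.length),
          List.getD_eq_getElem _ _ (by omega : j + 1 < row.length)]
        simp only [Nat.add_sub_cancel]
        omega
      · -- last position: j + 1 = k
        have hjk : j + 1 = k := by omega
        rw [dif_neg (by rw [hlen1]; omega)]
        rw [List.getElem_singleton]
        subst hjk
        simp only [pvH, if_neg (by omega : j + 1 ≠ 0)]
        rw [List.getLast_eq_getElem]
        rw [List.getD_eq_getElem dp 0 (by omega : j + 1 - 1 < dp.length)]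
        rw [List.getD_eq_getElem row 0 (by omega : j + 1 < row.length)]
        simp only [hdp]
        simp
        omega
def pvE : List (List Int) → Nat → List Int
  | [], k => List.replicate k 0
  | row :: rs, k =>
    (List.range k).map (fun i =>
      min (row.getD i 0 + (pvE rs (k+1)).getD i 0)
          (row.getD (i+1) 0 + (pvE rs (k+1)).getD (i+1) 0))

lemma pvE_nil_getD (k i : Nat) : (pvE [] k).getD i 0 = 0 := by
  simp only [pvE, List.getD_eq_getElem?_getD, List.getElem?_replicate]
  split <;> rfl

lemma pvE_cons_getD (row : List Int) (rs : List (List Int)) (k i : Nat) (hi : i < k) :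
    (pvE (row :: rs) k).getD i 0
      = min (row.getD i 0 + (pvE rs (k+1)).getD i 0)
            (row.getD (i+1) 0 + (pvE rs (k+1)).getD (i+1) 0) := by
  conv_lhs => rw [pvE]
  rw [PySem.List.getD_map_range _ _ _ _ hi]

lemma length_pvBStep (dp row : List Int) (k : Nat) (hk : 1 ≤ k) (hdp : dp.length = k)
    (hrow : k + 1 ≤ row.length) : (pvBStep dp row (k : Int)).length = k + 1 := by
  rw [pvBStep_eq dp row k hk hdp hrow]; simp

def pvSteps : List Int → Nat → List (List Int) → List Int
  | dp, _, [] => dp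
  | dp, k, row :: rs => pvSteps (pvBStep dp row (k : Int)) (k+1) rs

lemma pvL (rs : List (List Int)) : ∀ (k : Nat) (dp : List Int), 1 ≤ k → dp.length = k →
    (∀ j (_ : j < rs.length), k + j + 1 ≤ (rs[j]).length) →
    pvMinL (pvSteps dp k rs) =
      pvMinL ((List.range k).map (fun i => dp.getD i 0 + (pvE rs k).getD i 0)) := by
  induction rs with
  | nil =>
    intro k dp hk hdp _
    have h1 : (List.range k).map (fun i => dp.getD i 0 + (pvE [] k).getD i 0) = dp := by
      apply List.ext_getElem
      · simp [hdp]
      · intro i h1 h2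
        simp only [List.getElem_map, List.getElem_range, pvE_nil_getD]
        have : i < dp.length := by simpa using h2
        simp [List.getD_eq_getElem?_getD, List.getElem?_eq_getElem this]
    rw [h1]; rfl
  | cons row rs ih =>
    intro k dp hk hdp hrows
    have hrow : k + 1 ≤ row.length := by
      have := hrows 0 (by simp); simpa using this
    have hsteps : pvSteps dp k (row :: rs) = pvSteps (pvBStep dp row (k : Int)) (k+1) rs := rfl
    rw [hsteps, ih (k+1) _ (by omega) (length_pvBStep dp row k hk hdp hrow)
      (by intro j hj; have := hrows (j+1) (by simpa using hj); simp only [List.getElem_cons_succ] at this; omega)]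
    -- left side: rewrite bstep entries into pvG form
    have hL : (List.range (k+1)).map
        (fun i => (pvBStep dp row (k : Int)).getD i 0 + (pvE rs (k+1)).getD i 0)
        = (List.range (k+1)).map (pvG (fun j => dp.getD j 0)
            (fun j => row.getD j 0 + (pvE rs (k+1)).getD j 0) k) := by
      apply List.map_congr_left
      intro i hi
      simp only [List.mem_range] at hi
      rw [pvBStep_eq dp row k hk hdp hrow, PySem.List.getD_map_range _ _ _ _ hi]
      simp only [pvH, pvG]
      ring
    rw [hL, pvKey _ _ k hk]
    apply congrArg
    apply List.map_congr_left
    intro i hi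
    simp only [List.mem_range] at hi
    rw [pvE_cons_getD row rs k i hi]

def pvMval (t : List (List Int)) (r i : Nat) : Int :=
  (t.getD r []).getD i 0 + (pvE (t.drop (r+1)) (r+1)).getD i 0

lemma pvMval_last (t : List (List Int)) (hne : t ≠ []) (i : Nat) (_hi : i < t.length) :
    pvMval t (t.length - 1) i = (t.getD (t.length - 1) []).getD i 0 := by
  unfold pvMval
  have h1 : t.length - 1 + 1 = t.length := by
    have : 0 < t.length := List.length_pos_iff.mpr hne
    omega
  rw [h1, List.drop_length, pvE_nil_getD]
  ring

lemma pvMval_rec (t : List (List Int)) (r i : Nat) (hr : r + 1 < t.length) (hi : i < r + 1) :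
    pvMval t r i = (t.getD r []).getD i 0 + min (pvMval t (r+1) i) (pvMval t (r+1) (i+1)) := by
  unfold pvMval
  rw [List.drop_eq_getElem_cons hr, pvE_cons_getD _ _ _ _ hi]
  congr 2 <;> rw [List.getD_eq_getElem _ _ hr]


def pvF (tr dpO : List Int) (j : Nat) : Int :=
  tr.getD j 0 + min (dpO.getD j 0) (dpO.getD (j+1) 0)

lemma pvGetD_set_ne (xs : List Int) (n j : Nat) (v : Int) (h : n ≠ j) :
    (xs.set n v).getD j 0 = xs.getD j 0 := by
  rw [List.getD_eq_getElem?_getD, List.getD_eq_getElem?_getD, List.getElem?_set_ne h]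

lemma pvGetD_set_self (xs : List Int) (n : Nat) (v : Int) (h : n < xs.length) :
    (xs.set n v).getD n 0 = v := by
  rw [List.getD_eq_getElem?_getD, List.getElem?_set_self h]
  rfl

lemma pvInner (tr dpO : List Int) (r : Nat) (hr : r < dpO.length) :
    ∀ (c m : Nat) (S : List Int), c = r + 1 - m →
      S.length = dpO.length → (∀ j, m ≤ j → S.getD j 0 = dpO.getD j 0) →
      ((PySem.List.pyRange (m : Int) ((r : Int) + 1) 1).foldl
        (fun s i => PySem.List.pySetD s i (PySem.List.pyGetD tr i 0
          + min (PySem.List.pyGetD s i 0) (PySem.List.pyGetD s (i + 1) 0))) S).length = dpO.length ∧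
      ∀ j : Nat, ((PySem.List.pyRange (m : Int) ((r : Int) + 1) 1).foldl
        (fun s i => PySem.List.pySetD s i (PySem.List.pyGetD tr i 0
          + min (PySem.List.pyGetD s i 0) (PySem.List.pyGetD s (i + 1) 0))) S).getD j 0
        = if m ≤ j ∧ j ≤ r then pvF tr dpO j else S.getD j 0 := by
  intro c
  induction c with
  | zero =>
    intro m S hc hlen hagree
    have hm : r + 1 ≤ m := by omega
    rw [PySem.List.pyRange_one_eq_nil (by exact_mod_cast hm)]
    refine ⟨hlen, fun j => ?_⟩
    rw [if_neg (by omega)]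
    simp [List.foldl_nil]
  | succ c ih =>
    intro m S hc hlen hagree
    have hm : m < r + 1 := by omega
    rw [PySem.List.pyRange_one_cons (by exact_mod_cast hm)]
    rw [List.foldl_cons]
    have hv1 : PySem.List.pyGetD S (m : Int) 0 = dpO.getD m 0 := by
      rw [PySem.List.pyGetD_natCast]; exact hagree m le_rfl
    have hv2 : PySem.List.pyGetD S ((m : Int) + 1) 0 = dpO.getD (m+1) 0 := by
      have : (m : Int) + 1 = ((m + 1 : Nat) : Int) := by push_cast; ring
      rw [this, PySem.List.pyGetD_natCast]; exact hagree (m+1) (by omega)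
    have hS' : PySem.List.pySetD S (m : Int)
        (PySem.List.pyGetD tr (m : Int) 0
          + min (PySem.List.pyGetD S (m : Int) 0) (PySem.List.pyGetD S ((m : Int) + 1) 0))
        = S.set m (pvF tr dpO m) := by
      rw [PySem.List.pySetD_natCast, hv1, hv2, PySem.List.pyGetD_natCast]
      rfl
    rw [hS']
    have hcast : (m : Int) + 1 = ((m + 1 : Nat) : Int) := by push_cast; ring
    rw [hcast]
    obtain ⟨ihlen, ihget⟩ := ih (m+1) (S.set m (pvF tr dpO m)) (by omega)
      (by simp [hlen])
      (by intro j hj; rw [pvGetD_set_ne _ _ _ _ (by omega)]; exact hagree j (by omega))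
    refine ⟨ihlen, fun j => ?_⟩
    rw [ihget j]
    by_cases h1 : m + 1 ≤ j ∧ j ≤ r
    · rw [if_pos h1, if_pos (by omega)]
    · rw [if_neg h1]
      by_cases h2 : m ≤ j ∧ j ≤ r
      · have hjm : j = m := by omega
        subst hjm
        rw [if_pos h2, pvGetD_set_self _ _ _ (by omega)]
      · rw [if_neg h2, pvGetD_set_ne _ _ _ _ (by omega)]

lemma pvOuter (t : List (List Int)) :
    ∀ (r : Nat) (dp : List Int), r < t.length → t.length ≤ dp.length →
      (∀ i, i ≤ r → i < t.length → dp.getD i 0 = pvMval t r i) →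
      ((PySem.List.pyRange ((r : Int) - 1) (-1) (-1)).foldl
        (fun dp row =>
          (PySem.List.pyRange 0 (row + 1) 1).foldl
            (fun s i => PySem.List.pySetD s i
              (PySem.List.pyGetD (PySem.List.pyGetD t row []) i 0
                + min (PySem.List.pyGetD s i 0) (PySem.List.pyGetD s (i + 1) 0))) dp) dp).getD 0 0
        = pvMval t 0 0 := by
  intro r
  induction r with
  | zero =>
    intro dp hr hlen hinv
    rw [PySem.List.pyRange_neg_one_eq_nil (by norm_num)]
    exact hinv 0 le_rfl hr
  | succ r' ih =>
    intro dp hr hlen hinv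
    have hcast : ((r' + 1 : Nat) : Int) - 1 = (r' : Int) := by push_cast; ring
    rw [hcast, PySem.List.pyRange_neg_one_cons (by omega), List.foldl_cons]
    have hr' : r' < dp.length := by omega
    obtain ⟨hlen1, hget1⟩ := pvInner (PySem.List.pyGetD t (r' : Int) []) dp r' hr'
      (r' + 1) 0 dp (by omega) rfl (fun j _ => rfl)
    rw [Nat.cast_zero] at hlen1 hget1
    apply ih
    · omega
    · omega
    · intro i hi hin
      rw [hget1 i, if_pos (by omega)]
      unfold pvF
      have htr : PySem.List.pyGetD t (r' : Int) [] = t.getD r' [] := by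
        rw [PySem.List.pyGetD_natCast]
      rw [htr, hinv i (by omega) hin, hinv (i+1) (by omega) (by omega),
        pvMval_rec t r' i (by omega) (by omega)]

lemma pvSteps_ne_nil (rs : List (List Int)) : ∀ (dp : List Int) (k : Nat), dp ≠ [] →
    pvSteps dp k rs ≠ [] := by
  induction rs with
  | nil => intro dp k h; exact h
  | cons row rs ih =>
    intro dp k _
    exact ih _ (k+1) (by simp [pvBStep])

lemma pvBFold (t : List (List Int)) (hpre : ∀ r (_ : r < t.length), r + 1 ≤ (t[r]).length) :
    ∀ (c m : Nat) (dp : List Int), c = t.length - m → 1 ≤ m → dp.length = m →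
      (PySem.List.pyRange (m : Int) (t.length : Int) 1).foldl
          (fun dp r => pvBStep dp (PySem.List.pyGetD t r []) r) dp
        = pvSteps dp m (t.drop m) := by
  intro c
  induction c with
  | zero =>
    intro m dp hc hm hdp
    have h1 : t.length ≤ m := by omega
    rw [PySem.List.pyRange_one_eq_nil (by exact_mod_cast h1), List.drop_eq_nil_of_le h1]
    rfl
  | succ c ih =>
    intro m dp hc hm hdp
    have h1 : m < t.length := by omega
    rw [PySem.List.pyRange_one_cons (by exact_mod_cast h1), List.foldl_cons,
      List.drop_eq_getElem_cons h1]
    have hrow : PySem.List.pyGetD t (m : Int) [] = t[m] := by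
      rw [PySem.List.pyGetD_natCast, List.getD_eq_getElem _ _ h1]
    have hstep : pvSteps dp m (t[m] :: t.drop (m+1))
        = pvSteps (pvBStep dp t[m] (m : Int)) (m+1) (t.drop (m+1)) := rfl
    rw [hstep, ← hrow]
    have hcast : (m : Int) + 1 = ((m + 1 : Nat) : Int) := by push_cast; ring
    rw [hcast]
    exact ih (m+1) _ (by omega) (by omega)
      (by rw [hrow]; exact length_pvBStep dp t[m] m hm hdp (hpre m h1))

-- ===== VERDICT (by name: the statement is the Claim_ definition above) =====
theorem minTriangleSumDP_spec : Claim_equal_minTriangleSumDP := by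
  unfold Claim_equal_minTriangleSumDP
  intro t _ hpre
  unfold Spec_minTriangleSumDP minTriangleSumDP minTriangleSumDP_alt
  by_cases hne : t = []
  · rw [if_pos hne, if_pos hne]
  · rw [if_neg hne, if_neg hne]
    have hn : 0 < t.length := List.length_pos_iff.mpr hne
    -- A side
    have hlastlen : t.length ≤ (t.getLast hne).length := by
      rw [List.getLast_eq_getElem]
      have := hpre (t.length - 1) (by omega)
      omega
    have hdp0 : PySem.List.pyGetD t (-1) [] = t.getLast hne := PySem.List.pyGetD_neg_one t [] hne
    have hstart : PySem.List.len t - 2 = ((t.length - 1 : Nat) : Int) - 1 := by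
      rw [PySem.List.len_eq, Nat.cast_sub (by omega)]
      push_cast
      ring
    rw [hdp0, hstart]
    have hA := pvOuter t (t.length - 1) (t.getLast hne) (by omega) hlastlen
      (by
        intro i hi hin
        rw [pvMval_last t hne i hin, List.getLast_eq_getElem,
          List.getD_eq_getElem _ _ (by omega : t.length - 1 < t.length)])
    rw [PySem.List.pyGetD_zero, hA]
    -- B side
    rw [PySem.List.len_eq]
    have hBF := pvBFold t hpre (t.length - 1) 1
      [PySem.List.pyGetD (PySem.List.pyGetD t 0 []) 0 0] (by omega) le_rfl rfl
    rw [Nat.cast_one] at hBF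
    rw [hBF]
    have hx0 : PySem.List.pyGetD (PySem.List.pyGetD t 0 []) 0 0 = (t.getD 0 []).getD 0 0 := by
      rw [PySem.List.pyGetD_zero, PySem.List.pyGetD_zero]
    have hBL := pvL (t.drop 1) 1 [PySem.List.pyGetD (PySem.List.pyGetD t 0 []) 0 0]
      le_rfl (by simp)
      (by
        intro j hj
        have hjlen : 1 + j < t.length := by
          simp only [List.length_drop] at hj
          omega
        have hd : (t.drop 1)[j] = t[1 + j] := List.getElem_drop
        rw [hd]
        have := hpre (1 + j) hjlen
        omega)
    rcases h : pvSteps [PySem.List.pyGetD (PySem.List.pyGetD t 0 []) 0 0] 1 (t.drop 1) with _ | ⟨a, l⟩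
    · exact absurd h (pvSteps_ne_nil (t.drop 1) _ 1 (by simp))
    · rw [PySem.List.min?_id_cons]
      have hB2 : List.foldl min a l = pvMinL (a :: l) := (pvMinL_cons a l).symm
      rw [hB2, ← h, hBL]
      have hone : (List.range 1).map (fun i =>
          ([PySem.List.pyGetD (PySem.List.pyGetD t 0 []) 0 0].getD i 0
            + (pvE (t.drop 1) 1).getD i 0))
          = [(t.getD 0 []).getD 0 0 + (pvE (t.drop 1) 1).getD 0 0] := by
        simp [List.range_succ, hx0]
      rw [hone, pvMinL_cons, List.foldl_nil]
      rfl
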